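-- pv_equiv track=rewrite | github.com/JacksonJegatheesan/IA-task | IA-task.py | possibilities_to_graduate
-- ===== SOURCE A (Python) =====
-- def possibilities_to_graduate(N):
--     # pdb.set_trace()
--     if N<4:
--         # we can solve the problem using mathematical formula
--         # 2 ** (N - 1)
--         return f'{2**(N-1)}/{2**N}'
--
--     # There would be two choices everyday present , absent
--     total_choices=2
--     present=1
--     absent=1
--
--     # taking 3 because until 3 days it is handled inside the condition
--     # Sample possibilities for 3 days
--     # ['AAA','PPP','PAP','APA','PPA','APP','AAP','PAA'] -> n = 8
--     # possibilities of graduating for 3 days -> ['PPP','PAP','PPA','APP'] -> P 50%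
--     possibilities = 2**(3-1)
--     no_of_ways_to_attend = 2**3
--
--     for _ in range(4,N+1):
--         temp,absent,present,total_choices,possibilities = absent,present,total_choices,possibilities,no_of_ways_to_attend
--         no_of_ways_to_attend = (no_of_ways_to_attend-temp)*2+temp
--     return f'{absent+present+total_choices}/{no_of_ways_to_attend}'
-- ===== SOURCE B (Python) =====
-- def possibilities_to_graduate(N):
--     if N < 1:
--         # degenerate N: keep the closed form A's small-N branch uses
--         return f'{2**(N-1)}/{2**N}'
--     # W(n) = W(n-1)+W(n-2)+W(n-3)+W(n-4) (tetranacci) with W(0),W(-1),W(-2),W(-3)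
--     # = 1,1,0,0; for every N >= 1 the answer is (W(N) - W(N-1)) / W(N), computed
--     # by fast exponentiation of the 4x4 companion matrix: O(log N) matrix steps.
--     def mul(X, Y):
--         (a0, a1, a2, a3), (b0, b1, b2, b3), (c0, c1, c2, c3), (d0, d1, d2, d3) = X
--         (e0, e1, e2, e3), (f0, f1, f2, f3), (g0, g1, g2, g3), (h0, h1, h2, h3) = Y
--         return ((a0*e0 + a1*f0 + a2*g0 + a3*h0, a0*e1 + a1*f1 + a2*g1 + a3*h1,
--                  a0*e2 + a1*f2 + a2*g2 + a3*h2, a0*e3 + a1*f3 + a2*g3 + a3*h3),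
--                 (b0*e0 + b1*f0 + b2*g0 + b3*h0, b0*e1 + b1*f1 + b2*g1 + b3*h1,
--                  b0*e2 + b1*f2 + b2*g2 + b3*h2, b0*e3 + b1*f3 + b2*g3 + b3*h3),
--                 (c0*e0 + c1*f0 + c2*g0 + c3*h0, c0*e1 + c1*f1 + c2*g1 + c3*h1,
--                  c0*e2 + c1*f2 + c2*g2 + c3*h2, c0*e3 + c1*f3 + c2*g3 + c3*h3),
--                 (d0*e0 + d1*f0 + d2*g0 + d3*h0, d0*e1 + d1*f1 + d2*g1 + d3*h1,
--                  d0*e2 + d1*f2 + d2*g2 + d3*h2, d0*e3 + d1*f3 + d2*g3 + d3*h3))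
--
--     def mpow(X, e):
--         if e == 0:
--             return ((1, 0, 0, 0), (0, 1, 0, 0), (0, 0, 1, 0), (0, 0, 0, 1))
--         H = mpow(X, e // 2)
--         H2 = mul(H, H)
--         return H2 if e % 2 == 0 else mul(H2, X)
--
--     M = ((1, 1, 1, 1), (1, 0, 0, 0), (0, 1, 0, 0), (0, 0, 1, 0))
--     P = mpow(M, N)
--     # (W(N), W(N-1)) = first two components of P @ (W(0), W(-1), W(-2), W(-3))
--     wN = P[0][0] * 1 + P[0][1] * 1
--     wN1 = P[1][0] * 1 + P[1][1] * 1
--     return f'{wN - wN1}/{wN}'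
-- ===== Notes on version B (the rewrite author's own statement) =====
-- stated objective: faster
-- what changed: B replaces A's day-by-day linear loop by binary exponentiation of the four-by-four companion matrix of the tetranacci recurrence the loop implements, reading the numerator as W(N)-W(N-1).
-- outside the precondition, e.g. on possibilities_to_graduate(0): A returns '0.5/1', B returns '0.5/1'; on possibilities_to_graduate(-3): A returns '0.0625/0.125', B returns '0.0625/0.125'
import Mathlib
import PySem

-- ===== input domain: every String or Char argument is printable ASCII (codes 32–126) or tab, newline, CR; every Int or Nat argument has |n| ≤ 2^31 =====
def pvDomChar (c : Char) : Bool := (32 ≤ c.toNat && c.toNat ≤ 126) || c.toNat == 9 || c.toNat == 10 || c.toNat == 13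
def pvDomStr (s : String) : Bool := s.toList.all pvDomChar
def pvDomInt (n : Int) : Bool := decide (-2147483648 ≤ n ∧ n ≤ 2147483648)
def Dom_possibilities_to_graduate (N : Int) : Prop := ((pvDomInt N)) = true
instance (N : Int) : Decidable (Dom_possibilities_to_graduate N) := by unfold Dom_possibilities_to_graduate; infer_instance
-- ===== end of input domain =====

-- B replaces A's day-by-day O(N) loop by binary exponentiation of the companion matrix of the
-- tetranacci recurrence the loop implements (O(log N) matrix steps); measured faster on large N.

-- ===== PORT A =====
def possibilities_to_graduate (N : Int) : String :=
  if N < 4 then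
    PySem.Int.toStr (2 ^ (N - 1).toNat) ++ "/" ++ PySem.Int.toStr (2 ^ N.toNat)
  else
    -- state: (absent, present, total_choices, possibilities, no_of_ways_to_attend)
    let st := (PySem.List.pyRange 4 (N + 1) 1).foldl
      (fun (st : Int × Int × Int × Int × Int) _ =>
        let (absent, present, total_choices, possibilities, w) := st
        -- temp = absent; shift; no_of_ways = (no_of_ways - temp)*2 + temp
        (present, total_choices, possibilities, w, (w - absent) * 2 + absent))
      (1, 1, 2, 4, 8)
    let (absent, present, total_choices, _, w) := st
    PySem.Int.toStr (absent + present + total_choices) ++ "/" ++ PySem.Int.toStr w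

-- ===== PORT B =====
abbrev pvRow : Type := Int × Int × Int × Int
abbrev pvMat : Type := pvRow × pvRow × pvRow × pvRow

def pvMul (X Y : pvMat) : pvMat :=
  let ((a0, a1, a2, a3), (b0, b1, b2, b3), (c0, c1, c2, c3), (d0, d1, d2, d3)) := X
  let ((e0, e1, e2, e3), (f0, f1, f2, f3), (g0, g1, g2, g3), (h0, h1, h2, h3)) := Y
  ((a0*e0 + a1*f0 + a2*g0 + a3*h0, a0*e1 + a1*f1 + a2*g1 + a3*h1,
    a0*e2 + a1*f2 + a2*g2 + a3*h2, a0*e3 + a1*f3 + a2*g3 + a3*h3),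
   (b0*e0 + b1*f0 + b2*g0 + b3*h0, b0*e1 + b1*f1 + b2*g1 + b3*h1,
    b0*e2 + b1*f2 + b2*g2 + b3*h2, b0*e3 + b1*f3 + b2*g3 + b3*h3),
   (c0*e0 + c1*f0 + c2*g0 + c3*h0, c0*e1 + c1*f1 + c2*g1 + c3*h1,
    c0*e2 + c1*f2 + c2*g2 + c3*h2, c0*e3 + c1*f3 + c2*g3 + c3*h3),
   (d0*e0 + d1*f0 + d2*g0 + d3*h0, d0*e1 + d1*f1 + d2*g1 + d3*h1,
    d0*e2 + d1*f2 + d2*g2 + d3*h2, d0*e3 + d1*f3 + d2*g3 + d3*h3))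

def pvMpow (X : pvMat) (e : Nat) : pvMat :=
  if e = 0 then ((1, 0, 0, 0), (0, 1, 0, 0), (0, 0, 1, 0), (0, 0, 0, 1))
  else
    let H := pvMpow X (e / 2)
    let H2 := pvMul H H
    if e % 2 = 0 then H2 else pvMul H2 X
  decreasing_by exact Nat.div_lt_self (Nat.pos_of_ne_zero (by assumption)) (by omega)

def possibilities_to_graduate_alt (N : Int) : String :=
  if N < 1 then
    -- degenerate N: the closed form A's small-N branch uses
    PySem.Int.toStr (2 ^ (N - 1).toNat) ++ "/" ++ PySem.Int.toStr (2 ^ N.toNat)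
  else
    let M : pvMat := ((1, 1, 1, 1), (1, 0, 0, 0), (0, 1, 0, 0), (0, 0, 1, 0))
    let P := pvMpow M N.toNat
    let wN := P.1.1 * 1 + P.1.2.1 * 1
    let wN1 := P.2.1.1 * 1 + P.2.1.2.1 * 1
    PySem.Int.toStr (wN - wN1) ++ "/" ++ PySem.Int.toStr wN

-- ===== PRECONDITION & SPEC =====
-- Pre_ excludes nonpositive N, on which Python's power with a negative exponent is a FLOAT
-- and the returned string embeds float formatting ('0.5/1'), outside the Int port's reach.
def Pre_possibilities_to_graduate (N : Int) : Prop := 1 ≤ N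
instance (N : Int) : Decidable (Pre_possibilities_to_graduate N) := by unfold Pre_possibilities_to_graduate; infer_instance
def pvWitness_possibilities_to_graduate : Int := 7

def Spec_possibilities_to_graduate (N : Int) (out : String) : Prop := out = possibilities_to_graduate_alt N
instance (N : Int) (out : String) : Decidable (Spec_possibilities_to_graduate N out) := by unfold Spec_possibilities_to_graduate; infer_instance

-- ===== CLAIM (what is proved, stated in full; the proofs are below) =====
def Claim_equal_possibilities_to_graduate : Prop := ∀ (N : Int), Dom_possibilities_to_graduate N → Pre_possibilities_to_graduate N → Spec_possibilities_to_graduate N (possibilities_to_graduate N)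

-- ===== LEMMAS AND PROOFS =====

-- the tetranacci sequence both programs compute: w i = W(i-1) in the problem's terms
def pvW : Nat → Int
  | 0 => 0
  | 1 => 0
  | 2 => 1
  | 3 => 1
  | n + 4 => pvW (n + 3) + pvW (n + 2) + pvW (n + 1) + pvW n

-- A's loop step
def pvStep (st : Int × Int × Int × Int × Int) : Int × Int × Int × Int × Int :=
  let (absent, present, total_choices, possibilities, w) := st
  (present, total_choices, possibilities, w, (w - absent) * 2 + absent)

lemma pvFoldl_const {α σ : Type} (g : σ → σ) (l : List α) (s : σ) :
    l.foldl (fun st _ => g st) s = g^[l.length] s := by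
  induction l generalizing s with
  | nil => rfl
  | cons x xs ih => simp [List.foldl_cons, ih, Function.iterate_succ_apply]

lemma pvStep_iterate (m : Nat) :
    pvStep^[m] (1, 1, 2, 4, 8) =
      (pvW (m + 2), pvW (m + 3), pvW (m + 4), pvW (m + 5), pvW (m + 6)) := by
  induction m with
  | zero => decide
  | succ k ih =>
    rw [Function.iterate_succ_apply', ih]
    show (pvW (k+3), pvW (k+4), pvW (k+5), pvW (k+6), (pvW (k+6) - pvW (k+2)) * 2 + pvW (k+2))
      = (pvW (k+3), pvW (k+4), pvW (k+5), pvW (k+6), pvW (k+7))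
    have h1 : pvW (k + 6) = pvW (k + 5) + pvW (k + 4) + pvW (k + 3) + pvW (k + 2) := rfl
    have h2 : pvW (k + 7) = pvW (k + 6) + pvW (k + 5) + pvW (k + 4) + pvW (k + 3) := rfl
    simp only [Prod.mk.injEq, true_and]
    omega

-- action of a matrix on a column vector, as B computes it row by row
def pvAct (X : pvMat) (v : Int × Int × Int × Int) : Int × Int × Int × Int :=
  let ((a0, a1, a2, a3), (b0, b1, b2, b3), (c0, c1, c2, c3), (d0, d1, d2, d3)) := X
  let (v0, v1, v2, v3) := v
  (a0*v0 + a1*v1 + a2*v2 + a3*v3, b0*v0 + b1*v1 + b2*v2 + b3*v3,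
   c0*v0 + c1*v1 + c2*v2 + c3*v3, d0*v0 + d1*v1 + d2*v2 + d3*v3)

lemma pvAct_mul (X Y : pvMat) (v : Int × Int × Int × Int) :
    pvAct (pvMul X Y) v = pvAct X (pvAct Y v) := by
  obtain ⟨⟨a0,a1,a2,a3⟩,⟨b0,b1,b2,b3⟩,⟨c0,c1,c2,c3⟩,⟨d0,d1,d2,d3⟩⟩ := X
  obtain ⟨⟨e0,e1,e2,e3⟩,⟨f0,f1,f2,f3⟩,⟨g0,g1,g2,g3⟩,⟨h0,h1,h2,h3⟩⟩ := Y
  obtain ⟨v0,v1,v2,v3⟩ := v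
  simp only [pvMul, pvAct, Prod.mk.injEq]
  refine ⟨by ring, by ring, by ring, by ring⟩

lemma pvAct_mpow (X : pvMat) (e : Nat) (v : Int × Int × Int × Int) :
    pvAct (pvMpow X e) v = (pvAct X)^[e] v := by
  induction e using Nat.strong_induction_on generalizing v with
  | _ e ih =>
    rw [pvMpow]
    by_cases h0 : e = 0
    · subst h0
      simp only [if_pos]
      obtain ⟨v0,v1,v2,v3⟩ := v
      simp [pvAct]
    · simp only [if_neg h0]
      have hlt : e / 2 < e := Nat.div_lt_self (Nat.pos_of_ne_zero h0) (by omega)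
      by_cases h2 : e % 2 = 0
      · simp only [if_pos h2, pvAct_mul, ih _ hlt]
        rw [← Function.iterate_add_apply]
        congr 1
        omega
      · simp only [if_neg h2, pvAct_mul, ih _ hlt]
        rw [← Function.iterate_add_apply]
        have : (pvAct X)^[e / 2 + e / 2] (pvAct X v) = (pvAct X)^[e / 2 + e / 2 + 1] v := by
          rw [Function.iterate_succ_apply]
        rw [this]
        congr 1
        omega

def pvM : pvMat := ((1, 1, 1, 1), (1, 0, 0, 0), (0, 1, 0, 0), (0, 0, 1, 0))

lemma pvAct_M_iterate (k : Nat) :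
    (pvAct pvM)^[k] (1, 1, 0, 0) =
      (pvW (k + 3), pvW (k + 2), pvW (k + 1), pvW k) := by
  induction k with
  | zero => decide
  | succ m ih =>
    rw [Function.iterate_succ_apply', ih]
    show pvAct pvM (pvW (m+3), pvW (m+2), pvW (m+1), pvW m)
      = (pvW (m+4), pvW (m+3), pvW (m+2), pvW (m+1))
    have h2 : pvW (m + 4) = pvW (m + 3) + pvW (m + 2) + pvW (m + 1) + pvW m := rfl
    simp only [pvM, pvAct, Prod.mk.injEq]
    omega

-- B's else-branch value in terms of the tetranacci sequence
lemma pvB_branch (e : Nat) :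
    PySem.Int.toStr ((pvMpow pvM e).1.1 * 1 + (pvMpow pvM e).1.2.1 * 1
        - ((pvMpow pvM e).2.1.1 * 1 + (pvMpow pvM e).2.1.2.1 * 1))
      ++ "/" ++ PySem.Int.toStr ((pvMpow pvM e).1.1 * 1 + (pvMpow pvM e).1.2.1 * 1)
    = PySem.Int.toStr (pvW (e + 3) - pvW (e + 2)) ++ "/" ++ PySem.Int.toStr (pvW (e + 3)) := by
  have hB := pvAct_mpow pvM e (1, 1, 0, 0)
  rw [pvAct_M_iterate] at hB
  rcases hPP : pvMpow pvM e with ⟨⟨a0,a1,a2,a3⟩,⟨b0,b1,b2,b3⟩,⟨c0,c1,c2,c3⟩,⟨d0,d1,d2,d3⟩⟩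
  rw [hPP] at hB
  simp only [pvAct, Prod.mk.injEq] at hB
  obtain ⟨e0, e1, -, -⟩ := hB
  have g0 : (a0 * 1 + a1 * 1 : Int) = pvW (e + 3) := by omega
  have g1 : (b0 * 1 + b1 * 1 : Int) = pvW (e + 2) := by omega
  rw [g0, g1]

-- ===== VERDICT (by name: the statement is the Claim_ definition above) =====
theorem possibilities_to_graduate_spec : Claim_equal_possibilities_to_graduate := by
  intro N _ hpre
  unfold Pre_possibilities_to_graduate at hpre
  unfold Spec_possibilities_to_graduate
  unfold possibilities_to_graduate possibilities_to_graduate_alt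
  have h1 : ¬ N < 1 := by omega
  by_cases h : N < 4
  · simp only [if_pos h, if_neg h1]
    rw [show (((1,1,1,1),(1,0,0,0),(0,1,0,0),(0,0,1,0)) : pvMat) = pvM from rfl, pvB_branch]
    have : N = 1 ∨ N = 2 ∨ N = 3 := by omega
    rcases this with h2 | h2 | h2 <;> subst h2 <;> decide
  · simp only [if_neg h, if_neg h1]
    rw [show (((1,1,1,1),(1,0,0,0),(0,1,0,0),(0,0,1,0)) : pvMat) = pvM from rfl, pvB_branch]
    set k : Nat := (N - 3).toNat with hk
    have hrange : (PySem.List.pyRange 4 (N + 1) 1).length = k := by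
      rw [PySem.List.length_pyRange_one]
      omega
    have hA := pvFoldl_const pvStep (PySem.List.pyRange 4 (N + 1) 1) (1, 1, 2, 4, 8)
    rw [hrange, pvStep_iterate k] at hA
    have hAeq : (PySem.List.pyRange 4 (N + 1) 1).foldl
        (fun (st : Int × Int × Int × Int × Int) _ =>
          let (absent, present, total_choices, possibilities, w) := st
          (present, total_choices, possibilities, w, (w - absent) * 2 + absent))
        (1, 1, 2, 4, 8)
        = (pvW (k + 2), pvW (k + 3), pvW (k + 4), pvW (k + 5), pvW (k + 6)) := hA
    rw [hAeq]
    have hN : N.toNat = k + 3 := by omega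
    rw [hN]
    have h6 : pvW (k + 6) = pvW (k + 5) + pvW (k + 4) + pvW (k + 3) + pvW (k + 2) := rfl
    have hnum : pvW (k + 2) + pvW (k + 3) + pvW (k + 4) = pvW (k + 3 + 3) - pvW (k + 3 + 2) := by
      have e1 : k + 3 + 3 = k + 6 := by omega
      have e2 : k + 3 + 2 = k + 5 := by omega
      rw [e1, e2]
      omega
    rw [hnum, show k + 6 = k + 3 + 3 from by omega]
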